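-- pv_equiv track=rewrite | github.com/pmhalvor/fgsa | src/plot.py | parse_large_logs
-- ===== SOURCE A (Python) =====
-- def parse_large_logs(data):
--     runs = []
--     current_run = ["Parsing {} lines".format(len(data))]
--     for line in data:
--         if "new run" in line:
--             runs.append(current_run)
--             current_run = [line]
--         else:
--             current_run.append(line)
--     runs.append(current_run)
--     return runs
-- ===== SOURCE B (Python) =====
-- def parse_large_logs(data):
--     # Two staged passes: collect marker indices, then assemble the runs by slicing.
--     marks = [i for i, line in enumerate(data) if "new run" in line]
--     bounds = marks + [len(data)]
--     head = ["Parsing {} lines".format(len(data))] + data[:bounds[0]]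
--     return [head] + [data[bounds[i]:bounds[i + 1]] for i in range(len(marks))]
-- ===== Notes on version B (the rewrite author's own statement) =====
-- stated objective: alternative
-- what changed: A's single forward pass with an accumulating current_run is replaced by two staged passes: an enumerate pass that collects the marker-line indices, then assembly of the runs by slicing data between consecutive bounds (header prepended to the first slice).
import Mathlib
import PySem

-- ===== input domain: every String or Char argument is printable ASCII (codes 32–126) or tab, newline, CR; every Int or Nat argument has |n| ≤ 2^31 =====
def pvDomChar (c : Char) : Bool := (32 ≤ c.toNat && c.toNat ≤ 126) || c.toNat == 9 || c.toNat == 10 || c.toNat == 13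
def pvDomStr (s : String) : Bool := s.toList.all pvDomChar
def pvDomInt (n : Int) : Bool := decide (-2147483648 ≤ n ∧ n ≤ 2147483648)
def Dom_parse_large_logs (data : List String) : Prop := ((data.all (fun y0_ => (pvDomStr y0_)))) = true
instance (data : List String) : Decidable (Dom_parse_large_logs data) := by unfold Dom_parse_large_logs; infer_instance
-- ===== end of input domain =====

-- B replaces A's single accumulating pass by two staged passes: an enumerate pass
-- collecting marker indices, then slicing data between consecutive bounds (alternative).

-- shared one-liners: both Pythons test '"new run" in line' and format the same header
def pvMark (line : String) : Bool := PySem.Str.isIn "new run" line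
def pvHeader (data : List String) : String :=
  "Parsing " ++ PySem.Int.toStr (PySem.List.len data) ++ " lines"

-- ===== PORT A =====
-- forward loop: state (runs, current_run), appended at the back; final runs.append
def parse_large_logs (data : List String) : List (List String) :=
  let st := data.foldl
    (fun (st : List (List String) × List String) line =>
      if pvMark line then (st.1 ++ [st.2], [line]) else (st.1, st.2 ++ [line]))
    ([], [pvHeader data])
  st.1 ++ [st.2]

-- ===== PORT B =====
-- pass 1: marker indices via enumerate; pass 2: head slice data[:bounds[0]],
-- then data[bounds[i]:bounds[i+1]] for i in range(len(marks))
def parse_large_logs_alt (data : List String) : List (List String) :=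
  let marks : List Int := (PySem.List.enumerate data).filterMap
    (fun p => if pvMark p.2 then some p.1 else none)
  let bounds : List Int := marks ++ [PySem.List.len data]
  let head : List String :=
    [pvHeader data] ++ PySem.List.slice data none (some (bounds.getD 0 0))
  [head] ++ (PySem.List.pyRange 0 marks.length 1).map
    (fun i => PySem.List.slice data (some (bounds.getD i.toNat 0)) (some (bounds.getD (i.toNat + 1) 0)))

-- ===== PRECONDITION & SPEC =====
def Spec_parse_large_logs (data : List String) (out : List (List String)) : Prop := out = parse_large_logs_alt data
instance (data : List String) (out : List (List String)) : Decidable (Spec_parse_large_logs data out) := by unfold Spec_parse_large_logs; infer_instance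

-- ===== CLAIM (what is proved, stated in full; the proofs are below) =====
def Claim_equal_parse_large_logs : Prop := ∀ (data : List String), Dom_parse_large_logs data → Spec_parse_large_logs data (parse_large_logs data)

-- ===== LEMMAS AND PROOFS =====

-- reference splitter: marker lines begin a new run; cur is the open run
def pvSplit (cur : List String) : List String → List (List String)
  | [] => [cur]
  | x :: xs => if pvMark x then cur :: pvSplit [x] xs else pvSplit (cur ++ [x]) xs

-- marker positions (Nat, absolute indices)
def pvMarksOf : List String → List Nat
  | [] => []
  | x :: xs => if pvMark x then 0 :: (pvMarksOf xs).map (· + 1) else (pvMarksOf xs).map (· + 1)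

-- runs cut at the given index list
def pvRunsAux (l : List String) : List Nat → List (List String)
  | [] => []
  | a :: rest => ((l.drop a).take (rest.headD l.length - a)) :: pvRunsAux l rest

theorem pvA_loop (l : List String) (runs : List (List String)) (cur : List String) :
    (l.foldl
      (fun (st : List (List String) × List String) line =>
        if pvMark line then (st.1 ++ [st.2], [line]) else (st.1, st.2 ++ [line]))
      (runs, cur)).1
    ++ [(l.foldl
      (fun (st : List (List String) × List String) line =>
        if pvMark line then (st.1 ++ [st.2], [line]) else (st.1, st.2 ++ [line]))
      (runs, cur)).2]
    = runs ++ pvSplit cur l := by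
  induction l generalizing runs cur with
  | nil => simp [pvSplit]
  | cons x xs ih =>
    by_cases h : pvMark x = true
    · simp [List.foldl_cons, h, pvSplit, ih]
    · simp only [Bool.not_eq_true] at h
      simp [List.foldl_cons, h, pvSplit, ih]

theorem pvRunsAux_shift (x : String) (l : List String) (ms : List Nat) :
    pvRunsAux (x :: l) (ms.map (· + 1)) = pvRunsAux l ms := by
  induction ms with
  | nil => rfl
  | cons a rest ih =>
    simp only [List.map_cons, pvRunsAux, ih, List.drop_succ_cons]
    congr 1
    cases rest <;> simp [Nat.add_sub_add_right]

theorem pv_headD_map_succ (ms : List Nat) (n : Nat) :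
    (ms.map (· + 1)).headD (n + 1) = ms.headD n + 1 := by
  cases ms <;> simp

theorem pvSplit_runs (l : List String) (cur : List String) :
    pvSplit cur l
    = (cur ++ l.take ((pvMarksOf l).headD l.length)) :: pvRunsAux l (pvMarksOf l) := by
  induction l generalizing cur with
  | nil => simp [pvSplit, pvMarksOf, pvRunsAux]
  | cons x xs ih =>
    by_cases h : pvMark x = true
    · simp only [pvSplit, h, if_true, pvMarksOf, ih [x], List.length_cons]
      simp only [pvRunsAux, pvRunsAux_shift, List.drop_zero, Nat.sub_zero, List.length_cons,
        pv_headD_map_succ, List.take_succ_cons]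
      simp
    · simp only [Bool.not_eq_true] at h
      simp only [pvSplit, h, if_neg Bool.false_ne_true, pvMarksOf, ih (cur ++ [x]),
        List.length_cons, pv_headD_map_succ, List.take_succ_cons, pvRunsAux_shift]
      simp

-- the enumerate/filterMap pass computes pvMarksOf (with offset s)
theorem pvMarks_eq (l : List String) (s : Int) :
    (PySem.List.enumerate l s).filterMap
      (fun p => if pvMark p.2 then some p.1 else none)
    = (pvMarksOf l).map (fun (a : Nat) => s + (a : Int)) := by
  induction l generalizing s with
  | nil => simp [PySem.List.enumerate_nil, pvMarksOf]
  | cons x xs ih =>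
    rw [PySem.List.enumerate_cons, List.filterMap_cons]
    by_cases h : pvMark x = true
    · simp only [h, if_true, ih (s + 1), pvMarksOf, List.map_cons, List.map_map]
      refine congrArg₂ List.cons (by simp) ?_
      refine List.map_congr_left fun a _ => ?_
      simp only [Function.comp_apply]
      push_cast
      ring
    · simp only [Bool.not_eq_true] at h
      simp only [h, if_neg Bool.false_ne_true, ih (s + 1), pvMarksOf, List.map_map]
      refine List.map_congr_left fun a _ => ?_
      simp only [Function.comp_apply]
      push_cast
      ring

-- getD through the Int-cast of a Nat bounds list
theorem pv_getD_map_cast (bs : List Nat) (j : Nat) :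
    ((bs.map (fun (a : Nat) => (a : Int))).getD j 0) = ((bs.getD j 0 : Nat) : Int) := by
  induction bs generalizing j with
  | nil => simp
  | cons a rest ih =>
    cases j with
    | zero => rfl
    | succ n => simpa [List.getD_cons_succ] using ih n

-- the range-and-slice pass equals pvRunsAux on the Nat bounds (Nat-range form)
theorem pv_slices_nat (l : List String) (ms : List Nat) :
    (List.range ms.length).map
      (fun k =>
        PySem.List.slice l
          (some (((ms ++ [l.length]).map (fun (a : Nat) => (a : Int))).getD k 0))
          (some (((ms ++ [l.length]).map (fun (a : Nat) => (a : Int))).getD (k + 1) 0)))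
    = pvRunsAux l ms := by
  induction ms with
  | nil => simp [pvRunsAux]
  | cons a rest ih =>
    rw [List.length_cons, List.range_succ_eq_map, List.map_cons, List.map_map]
    refine congrArg₂ List.cons ?_ ?_
    · show PySem.List.slice l (some ((a : Nat) : Int))
        (some (((rest ++ [l.length]).map (fun (a : Nat) => (a : Int))).getD 0 0)) = _
      rw [pv_getD_map_cast, PySem.List.slice_natCast]
      show _ = (l.drop a).take (rest.headD l.length - a)
      cases rest <;> simp
    · rw [← ih]
      refine List.map_congr_left fun k _ => ?_
      simp

-- wrapper: the pyRange/Int form used by the port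
theorem pv_slices_eq (l : List String) (ms : List Nat) :
    (PySem.List.pyRange 0 (ms.length : Int) 1).map
      (fun i =>
        PySem.List.slice l
          (some (((ms.map (fun (a : Nat) => (a : Int))) ++ [(l.length : Int)]).getD i.toNat 0))
          (some (((ms.map (fun (a : Nat) => (a : Int))) ++ [(l.length : Int)]).getD (i.toNat + 1) 0)))
    = pvRunsAux l ms := by
  rw [PySem.List.pyRange_one, List.map_map, ← pv_slices_nat l ms]
  simp only [Int.sub_zero, Int.toNat_natCast]
  refine List.map_congr_left fun k _ => ?_
  simp [List.map_append]

-- ===== VERDICT (by name: the statement is the Claim_ definition above) =====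
theorem parse_large_logs_spec : Claim_equal_parse_large_logs := by
  intro data _
  show parse_large_logs data = parse_large_logs_alt data
  unfold parse_large_logs parse_large_logs_alt
  rw [pvA_loop data [] [pvHeader data], pvSplit_runs]
  simp only [PySem.List.len_eq]
  rw [show (PySem.List.enumerate data).filterMap
        (fun p => if pvMark p.2 then some p.1 else none)
      = (pvMarksOf data).map (fun (a : Nat) => (a : Int)) from by rw [pvMarks_eq]; simp]
  refine congrArg₂ List.cons ?_ ?_
  · rw [show (pvMarksOf data).map (fun (a : Nat) => (a : Int)) ++ [((data.length : Nat) : Int)]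
        = ((pvMarksOf data) ++ [data.length]).map (fun (a : Nat) => (a : Int)) from by simp]
    rw [pv_getD_map_cast, PySem.List.slice_to_natCast]
    cases pvMarksOf data <;> simp
  · rw [show ((pvMarksOf data).map (fun (a : Nat) => (a : Int))).length
        = ((pvMarksOf data).length : Nat) from by simp]
    exact (pv_slices_eq data (pvMarksOf data)).symm
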